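-- pv_equiv track=rewrite | github.com/kase1111-hash/phi_psi_atlas | allosteric_permutation.py | count_residue_overlap
-- ===== SOURCE A (Python) =====
-- def count_residue_overlap(sig_a, sig_b, zones):
--     """Count total residues overlapping with any zone."""
--     sig_a_set = set(sig_a)
--     sig_b_set = set(sig_b)
--     all_zone_a = set()
--     all_zone_b = set()
--     for zone_def in zones.values():
--         all_zone_a |= set(zone_def.get('A', []))
--         all_zone_b |= set(zone_def.get('B', []))
--     return len(sig_a_set & all_zone_a) + len(sig_b_set & all_zone_b)
-- ===== SOURCE B (Python) =====
-- def count_residue_overlap(sig_a, sig_b, zones):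
--     """Count total residues overlapping with any zone."""
--     def hits(sig, key):
--         return sum(1 for r in set(sig)
--                    if any(r in z.get(key, []) for z in zones.values()))
--     return hits(sig_a, 'A') + hits(sig_b, 'B')
-- ===== Notes on version B (the rewrite author's own statement) =====
-- stated objective: simpler
-- what changed: Instead of building two accumulated union sets over all zones and intersecting them with the signature sets, B tests each deduplicated signature residue directly against every zone's list and sums the hits.
import Mathlib
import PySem

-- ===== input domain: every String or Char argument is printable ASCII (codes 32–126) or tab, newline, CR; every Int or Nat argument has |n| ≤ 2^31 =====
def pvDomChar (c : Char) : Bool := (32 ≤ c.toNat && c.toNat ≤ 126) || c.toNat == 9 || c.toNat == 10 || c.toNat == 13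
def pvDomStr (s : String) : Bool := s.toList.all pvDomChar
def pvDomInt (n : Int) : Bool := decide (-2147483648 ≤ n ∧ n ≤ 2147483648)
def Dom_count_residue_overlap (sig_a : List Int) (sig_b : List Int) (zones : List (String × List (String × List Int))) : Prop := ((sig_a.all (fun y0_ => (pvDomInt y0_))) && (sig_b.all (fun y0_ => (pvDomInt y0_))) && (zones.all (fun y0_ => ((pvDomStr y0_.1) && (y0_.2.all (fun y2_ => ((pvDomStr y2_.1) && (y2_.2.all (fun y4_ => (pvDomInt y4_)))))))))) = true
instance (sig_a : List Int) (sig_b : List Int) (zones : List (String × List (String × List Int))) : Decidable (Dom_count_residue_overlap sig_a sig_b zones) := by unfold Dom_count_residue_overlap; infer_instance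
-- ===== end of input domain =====

-- B replaces A's "build accumulated zone-union sets, then intersect" by a direct per-residue
-- membership scan over the zones (simpler decomposition; same exact counts).


-- ===== PORT A =====
def count_residue_overlap (sig_a : List Int) (sig_b : List Int) (zones : List (String × List (String × List Int))) : Int :=
  let sig_a_set : PySem.Set Int := PySem.Set.ofList sig_a
  let sig_b_set : PySem.Set Int := PySem.Set.ofList sig_b
  let p :=
    (PySem.Dict.ofList zones).values.foldl
      (fun (p : PySem.Set Int × PySem.Set Int) zone_def =>
        (PySem.Set.union p.1 (PySem.Set.ofList ((PySem.Dict.ofList zone_def).getD "A" [])),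
         PySem.Set.union p.2 (PySem.Set.ofList ((PySem.Dict.ofList zone_def).getD "B" []))))
      (PySem.Set.empty, PySem.Set.empty)
  PySem.Set.len (PySem.Set.inter sig_a_set p.1) + PySem.Set.len (PySem.Set.inter sig_b_set p.2)

-- ===== PORT B =====
-- sum(1 for r in set(sig) if any(r in z.get(key, []) for z in zones.values()))
def croHits (sig : List Int) (key : String) (zones : List (String × List (String × List Int))) : Int :=
  (((PySem.Set.ofList sig).filter
      (fun r => (PySem.Dict.ofList zones).values.any
        (fun z => ((PySem.Dict.ofList z).getD key []).contains r))).length : Int)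

def count_residue_overlap_alt (sig_a : List Int) (sig_b : List Int) (zones : List (String × List (String × List Int))) : Int :=
  croHits sig_a "A" zones + croHits sig_b "B" zones

-- ===== PRECONDITION & SPEC =====
def Spec_count_residue_overlap (sig_a : List Int) (sig_b : List Int) (zones : List (String × List (String × List Int))) (out : Int) : Prop := out = count_residue_overlap_alt sig_a sig_b zones
instance (sig_a : List Int) (sig_b : List Int) (zones : List (String × List (String × List Int))) (out : Int) : Decidable (Spec_count_residue_overlap sig_a sig_b zones out) := by unfold Spec_count_residue_overlap; infer_instance

-- ===== CLAIM (what is proved, stated in full; the proofs are below) =====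
def Claim_equal_count_residue_overlap : Prop := ∀ (sig_a : List Int) (sig_b : List Int) (zones : List (String × List (String × List Int))), Dom_count_residue_overlap sig_a sig_b zones → Spec_count_residue_overlap sig_a sig_b zones (count_residue_overlap sig_a sig_b zones)

-- ===== LEMMAS AND PROOFS =====
theorem mem_foldl_union {β : Type} (g : β → List Int) (l : List β) (s : PySem.Set Int) (r : Int) :
    r ∈ l.foldl (fun s z => PySem.Set.union s (PySem.Set.ofList (g z))) s ↔
      r ∈ s ∨ ∃ z ∈ l, r ∈ g z := by
  induction l generalizing s with
  | nil => simp
  | cons z l ih =>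
    simp only [List.foldl_cons, ih, PySem.Set.mem_union, PySem.Set.mem_ofList,
      List.exists_mem_cons_iff]
    tauto

theorem croHits_eq (sig : List Int) (key : String) (zones : List (String × List (String × List Int))) :
    PySem.Set.len (PySem.Set.inter (PySem.Set.ofList sig)
      ((PySem.Dict.ofList zones).values.foldl
        (fun s z => PySem.Set.union s (PySem.Set.ofList ((PySem.Dict.ofList z).getD key [])))
        PySem.Set.empty)) = croHits sig key zones := by
  unfold croHits
  simp only [PySem.Set.len, PySem.Set.inter]
  rw [Nat.cast_inj]
  refine congrArg List.length (List.filter_congr ?_)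
  intro r _
  rw [Bool.eq_iff_iff]
  simp only [PySem.Set.contains_iff,
    mem_foldl_union (g := fun z => (PySem.Dict.ofList z).getD key []), List.any_eq_true]
  simp [PySem.Set.empty]

theorem count_residue_overlap_eq_alt (sig_a : List Int) (sig_b : List Int)
    (zones : List (String × List (String × List Int))) :
    count_residue_overlap sig_a sig_b zones = count_residue_overlap_alt sig_a sig_b zones := by
  unfold count_residue_overlap count_residue_overlap_alt
  dsimp only
  rw [PySem.List.foldl_prod_mk
    (f := fun s z => PySem.Set.union s (PySem.Set.ofList ((PySem.Dict.ofList z).getD "A" [])))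
    (g := fun s z => PySem.Set.union s (PySem.Set.ofList ((PySem.Dict.ofList z).getD "B" []))) ]
  rw [croHits_eq, croHits_eq]

-- ===== VERDICT (by name: the statement is the Claim_ definition above) =====
theorem count_residue_overlap_spec : Claim_equal_count_residue_overlap := by
  intro sig_a sig_b zones _
  exact count_residue_overlap_eq_alt sig_a sig_b zones
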